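-- pv_equiv track=rewrite | github.com/InfornoFire/DF-Metadata-Customizer | DF_Metadata_Customizer.py | _group_rules_by_logic
-- ===== SOURCE A (Python) =====
-- def _group_rules_by_logic(rules):
--     """Group rules into logical blocks based on AND/OR operators"""
--     if not rules:
--         return []
--
--     blocks = []
--     current_block = []
--
--     for i, rule in enumerate(rules):
--         # First rule always starts a block
--         if i == 0:
--             current_block.append(rule)
--             continue
--
--         logic = rule.get("logic", "AND")
--
--         if logic == "AND":
--             # AND continues the current block
--             current_block.append(rule)
--         else:
--             # OR starts a new block
--             if current_block:
--                 blocks.append(current_block)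
--             current_block = [rule]
--
--     # Don't forget the last block
--     if current_block:
--         blocks.append(current_block)
--
--     return blocks
-- ===== SOURCE B (Python) =====
-- def _group_rules_by_logic(rules):
--     """Group rules into logical blocks based on AND/OR operators.
--
--     Two-pointer scan: each block is found as a whole slice rules[i:j],
--     where j is the first index after i whose logic is not "AND"."""
--     blocks = []
--     i = 0
--     n = len(rules)
--     while i < n:
--         j = i + 1
--         while j < n and rules[j].get("logic", "AND") == "AND":
--             j += 1
--         blocks.append(rules[i:j])
--         i = j
--     return blocks
-- ===== Notes on version B (the rewrite author's own statement) =====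
-- stated objective: alternative
-- what changed: Replaces the per-rule accumulator loop (current_block with append/flush branches and a trailing flush) by a two-pointer scan that finds each block's end index and emits the whole block as one slice rules[i:j].
import Mathlib
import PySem

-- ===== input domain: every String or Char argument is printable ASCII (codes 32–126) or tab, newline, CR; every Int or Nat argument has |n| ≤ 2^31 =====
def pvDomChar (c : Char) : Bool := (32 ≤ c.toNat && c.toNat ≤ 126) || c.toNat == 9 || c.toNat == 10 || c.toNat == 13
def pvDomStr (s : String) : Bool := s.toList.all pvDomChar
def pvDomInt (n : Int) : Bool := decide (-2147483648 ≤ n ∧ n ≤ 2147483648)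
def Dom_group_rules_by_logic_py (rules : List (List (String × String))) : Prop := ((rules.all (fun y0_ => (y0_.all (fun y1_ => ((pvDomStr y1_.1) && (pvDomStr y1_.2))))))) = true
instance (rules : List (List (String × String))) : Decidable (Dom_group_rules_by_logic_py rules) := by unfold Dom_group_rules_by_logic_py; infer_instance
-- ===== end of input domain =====

-- B groups the rules by a two-pointer scan that emits each block as one slice rules[i:j]
-- instead of A's per-rule accumulator with append/flush branches; same O(n) cost (alternative decomposition).

-- ===== PORT A =====
-- rule.get("logic", "AND") == "AND"
def pvIsAnd (r : List (String × String)) : Bool :=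
  PySem.Dict.getD (PySem.Dict.mk r) "logic" "AND" == "AND"

def group_rules_by_logic_py (rules : List (List (String × String))) : List (List (List (String × String))) :=
  if rules = [] then []
  else
    -- for i, rule in enumerate(rules): …
    let fin := (PySem.List.enumerate rules).foldl
      (fun (st : List (List (List (String × String))) × List (List (String × String))) p =>
        if p.1 = 0 then (st.1, st.2 ++ [p.2])          -- first rule always starts a block
        else if pvIsAnd p.2 then (st.1, st.2 ++ [p.2]) -- AND continues the current block
        else ((if st.2 ≠ [] then st.1 ++ [st.2] else st.1), [p.2]))  -- OR starts a new block
      ([], [])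
    if fin.2 ≠ [] then fin.1 ++ [fin.2] else fin.1     -- don't forget the last block

-- ===== PORT B =====
-- inner while: j += 1 while j < n and rules[j].get("logic","AND") == "AND"
-- (j is a non-negative Python int and the guard keeps it in range, so rules.getD j [] is exact)
def pvAdvance (rules : List (List (String × String))) (n j : Nat) : Nat :=
  if j < n then
    if pvIsAnd (rules.getD j []) then pvAdvance rules n (j + 1) else j
  else j
termination_by n - j

theorem pvAdvance_ge (rules : List (List (String × String))) (n j : Nat) :
    j ≤ pvAdvance rules n j := by
  unfold pvAdvance
  split
  · split
    · exact le_trans (Nat.le_succ j) (pvAdvance_ge rules n (j + 1))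
    · exact le_refl j
  · exact le_refl j
termination_by n - j

-- outer while over block starts
def pvOuter (rules : List (List (String × String))) (n i : Nat)
    (blocks : List (List (List (String × String)))) : List (List (List (String × String))) :=
  if _h : i < n then
    let j := pvAdvance rules n (i + 1)
    pvOuter rules n j (blocks ++ [PySem.List.slice rules (some (i : Int)) (some (j : Int))])
  else blocks
termination_by n - i
decreasing_by
  have := pvAdvance_ge rules n (i + 1)
  omega

def group_rules_by_logic_py_alt (rules : List (List (String × String))) : List (List (List (String × String))) :=
  pvOuter rules rules.length 0 []

-- ===== PRECONDITION & SPEC =====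
def Spec_group_rules_by_logic_py (rules : List (List (String × String))) (out : List (List (List (String × String)))) : Prop := out = group_rules_by_logic_py_alt rules
instance (rules : List (List (String × String))) (out : List (List (List (String × String)))) : Decidable (Spec_group_rules_by_logic_py rules out) := by unfold Spec_group_rules_by_logic_py; infer_instance

-- ===== CLAIM (what is proved, stated in full; the proofs are below) =====
def Claim_equal_group_rules_by_logic_py : Prop := ∀ (rules : List (List (String × String))), Dom_group_rules_by_logic_py rules → Spec_group_rules_by_logic_py rules (group_rules_by_logic_py rules)

-- ===== LEMMAS AND PROOFS =====

-- common reference shape: split at each non-AND rule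
def pvSpan : List (List (String × String)) → List (List (List (String × String)))
  | [] => []
  | x :: xs => (x :: xs.takeWhile pvIsAnd) :: pvSpan (xs.dropWhile pvIsAnd)
termination_by l => l.length
decreasing_by
  have := List.length_dropWhile_le pvIsAnd xs
  simp only [List.length_cons]; omega

-- A-side accumulator recursion
def pvGo (cur : List (List (String × String))) :
    List (List (String × String)) → List (List (List (String × String)))
  | [] => [cur]
  | x :: xs => if pvIsAnd x then pvGo (cur ++ [x]) xs else cur :: pvGo [x] xs

theorem pvGo_eq_span (l : List (List (String × String))) :
    ∀ cur, pvGo cur l = (cur ++ l.takeWhile pvIsAnd) :: pvSpan (l.dropWhile pvIsAnd) := by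
  induction l with
  | nil => intro cur; simp [pvGo, pvSpan.eq_def]
  | cons x xs ih =>
    intro cur
    by_cases hx : pvIsAnd x
    · simp [pvGo, hx, ih]
    · rw [pvGo, if_neg hx, ih, List.takeWhile_cons, if_neg hx, List.dropWhile_cons, if_neg hx, pvSpan]
      simp

-- A's fold with a nonempty current block and positive indices computes pvGo
theorem pvFold_eq_go (rest : List (List (String × String))) :
    ∀ (s : Int) (blocks : List (List (List (String × String))))
      (cur : List (List (String × String))), 0 < s → cur ≠ [] →
    (let fin := (PySem.List.enumerate rest s).foldl
      (fun (st : List (List (List (String × String))) × List (List (String × String))) p =>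
        if p.1 = 0 then (st.1, st.2 ++ [p.2])
        else if pvIsAnd p.2 then (st.1, st.2 ++ [p.2])
        else ((if st.2 ≠ [] then st.1 ++ [st.2] else st.1), [p.2]))
      (blocks, cur)
     if fin.2 ≠ [] then fin.1 ++ [fin.2] else fin.1) = blocks ++ pvGo cur rest := by
  induction rest with
  | nil => intro s blocks cur hs hcur; simp [PySem.List.enumerate_nil, pvGo, hcur]
  | cons x xs ih =>
    intro s blocks cur hs hcur
    rw [PySem.List.enumerate_cons]
    simp only [List.foldl_cons]
    rw [if_neg (show ¬(s = 0) by omega)]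
    by_cases hx : pvIsAnd x
    · rw [if_pos hx]
      rw [ih (s + 1) blocks (cur ++ [x]) (by omega) (by simp)]
      rw [pvGo, if_pos hx]
    · rw [if_neg hx, if_pos hcur]
      rw [ih (s + 1) (blocks ++ [cur]) [x] (by omega) (by simp)]
      rw [pvGo, if_neg hx]
      simp

theorem pvA_eq_span (rules : List (List (String × String))) :
    group_rules_by_logic_py rules = pvSpan rules := by
  cases rules with
  | nil => simp [group_rules_by_logic_py, pvSpan.eq_def]
  | cons r rest =>
    unfold group_rules_by_logic_py
    rw [if_neg (by simp)]
    rw [PySem.List.enumerate_cons]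
    simp only [List.foldl_cons, if_true]
    have h := pvFold_eq_go rest (0 + 1) [] [r] (by omega) (by simp)
    simp only [List.nil_append] at h ⊢
    rw [h, pvGo_eq_span, pvSpan]
    simp

-- pvAdvance finds the end of the AND-run starting at j
theorem pvAdvance_eq (rules : List (List (String × String))) :
    ∀ j, j ≤ rules.length →
      pvAdvance rules rules.length j = j + ((rules.drop j).takeWhile pvIsAnd).length := by
  intro j
  induction hn : rules.length - j generalizing j with
  | zero =>
    intro hj
    have hj' : j = rules.length := by omega
    unfold pvAdvance
    rw [if_neg (by omega)]
    simp [hj', List.drop_length]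
  | succ m ih =>
    intro hj
    have hlt : j < rules.length := by omega
    have hdrop : rules.drop j = rules[j] :: rules.drop (j + 1) :=
      List.drop_eq_getElem_cons hlt
    unfold pvAdvance
    rw [if_pos hlt]
    have hget : rules.getD j [] = rules[j] := List.getD_eq_getElem rules [] hlt
    by_cases hx : pvIsAnd rules[j]
    · rw [hget, if_pos hx, ih (j + 1) (by omega) (by omega)]
      rw [hdrop, List.takeWhile_cons, if_pos hx]
      simp; omega
    · rw [hget, if_neg hx, hdrop, List.takeWhile_cons, if_neg hx]
      simp

-- B's outer loop computes pvSpan of the remaining suffix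
theorem pvOuter_eq_span (rules : List (List (String × String))) :
    ∀ (m i : Nat) (blocks : List (List (List (String × String)))),
      rules.length - i ≤ m → i ≤ rules.length →
      pvOuter rules rules.length i blocks = blocks ++ pvSpan (rules.drop i) := by
  intro m
  induction m with
  | zero =>
    intro i blocks hm hi
    have hie : i = rules.length := by omega
    unfold pvOuter
    rw [dif_neg (by omega)]
    simp [hie, List.drop_length, pvSpan.eq_def]
  | succ m ih =>
    intro i blocks hm hi
    by_cases hlt : i < rules.length
    · have hdrop : rules.drop i = rules[i] :: rules.drop (i + 1) :=
        List.drop_eq_getElem_cons hlt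
      set tw := (rules.drop (i + 1)).takeWhile pvIsAnd with htw
      set dw := (rules.drop (i + 1)).dropWhile pvIsAnd with hdw
      have hsplit : tw ++ dw = rules.drop (i + 1) :=
        List.takeWhile_append_dropWhile
      have htle : tw.length ≤ rules.length - (i + 1) := by
        have := congrArg List.length hsplit
        simp only [List.length_append, List.length_drop] at this
        omega
      have hadv : pvAdvance rules rules.length (i + 1) = i + 1 + tw.length :=
        pvAdvance_eq rules (i + 1) (by omega)
      have htake : (rules.drop (i + 1)).take tw.length = tw := by
        rw [← hsplit]; exact List.take_left ..
      have hdropt : (rules.drop (i + 1)).drop tw.length = dw := by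
        rw [← hsplit]; exact List.drop_left ..
      have hslice : PySem.List.slice rules (some (i : Int)) (some ((i + 1 + tw.length : Nat) : Int)) =
          rules[i] :: tw := by
        rw [PySem.List.slice_natCast, hdrop]
        have h1 : i + 1 + tw.length - i = tw.length + 1 := by omega
        rw [h1, List.take_succ_cons, htake]
      have hdropj : rules.drop (i + 1 + tw.length) = dw := by
        rw [← List.drop_drop, hdropt]
      unfold pvOuter
      rw [dif_pos hlt]
      simp only [hadv]
      rw [ih (i + 1 + tw.length) (blocks ++ [PySem.List.slice rules (some (i : Int)) (some ((i + 1 + tw.length : Nat) : Int))]) (by omega) (by omega)]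
      rw [hslice, hdropj, hdrop, pvSpan]
      simp [← htw, ← hdw]
    · have hie : i = rules.length := by omega
      unfold pvOuter
      rw [dif_neg hlt]
      simp [hie, List.drop_length, pvSpan.eq_def]

theorem pvB_eq_span (rules : List (List (String × String))) :
    group_rules_by_logic_py_alt rules = pvSpan rules := by
  unfold group_rules_by_logic_py_alt
  rw [pvOuter_eq_span rules rules.length 0 [] (by omega) (by omega)]
  simp

-- ===== VERDICT (by name: the statement is the Claim_ definition above) =====
theorem group_rules_by_logic_py_spec : Claim_equal_group_rules_by_logic_py := by
  intro rules _
  unfold Spec_group_rules_by_logic_py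
  rw [pvA_eq_span, pvB_eq_span]
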